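-- pv_equiv track=rewrite | github.com/joooonis/programmers | KAKAO/week14/표현 가능한 이진트리.py | solution
-- ===== SOURCE A (Python) =====
-- def solution(numbers):
--     answer = []
--     for num in numbers:
--         n = bin(num)[2:]
--         while not isFullBinaryTree(len(n)):
--             n = '0' + n
--         answer.append(checkIsFullBinaryTree(n))
--     return answer
--
-- def checkIsFullBinaryTree(binary):
--     if len(binary) == 1:
--         return 1
--     mid = binary[len(binary)//2]
--     left = binary[:len(binary)//2]
--     right = binary[len(binary)//2+1:]
--
--     if mid == '1':
--         return checkIsFullBinaryTree(left) * checkIsFullBinaryTree(right)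
--     else:
--         return isNotIncluedsOne(left) * isNotIncluedsOne(right)
--
-- def isFullBinaryTree(n):
--     if n == 1:
--         return True
--     if n % 2 == 0:
--         return False
--     return isFullBinaryTree(n//2)
--
-- def isNotIncluedsOne(binary):
--     return not '1' in binary
-- ===== SOURCE B (Python) =====
-- # Alternative algorithm: pad once to the next full-tree length, then for every '1'
-- # bit verify the root-to-node path (binary-search descent) passes only '1' ancestors.
-- def solution(numbers):
--     return [check(num) for num in numbers]
--
-- def check(num):
--     s = bin(num)[2:]
--     L = 1
--     while L < len(s):
--         L = 2 * L + 1
--     s = '0' * (L - len(s)) + s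
--     for p in range(L):
--         if s[p] == '1' and not path_ok(s, p):
--             return 0
--     return 1
--
-- def path_ok(s, p):
--     lo, hi = 0, len(s)
--     while True:
--         mid = (lo + hi) // 2
--         if mid == p:
--             return True
--         if s[mid] != '1':
--             return False
--         if p < mid:
--             hi = mid
--         else:
--             lo = mid + 1
-- ===== Notes on version B (the rewrite author's own statement) =====
-- stated objective: alternative
-- what changed: Replaces the recursive divide-and-conquer product of subtree checks (with string slicing) with a flat scan of the padded string that, for each '1' position, verifies all its ancestors are '1' via an iterative binary-search descent from the root; padding is computed in closed form (next length of shape 2^k-1) instead of prepending one '0' at a time.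
import Mathlib
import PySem

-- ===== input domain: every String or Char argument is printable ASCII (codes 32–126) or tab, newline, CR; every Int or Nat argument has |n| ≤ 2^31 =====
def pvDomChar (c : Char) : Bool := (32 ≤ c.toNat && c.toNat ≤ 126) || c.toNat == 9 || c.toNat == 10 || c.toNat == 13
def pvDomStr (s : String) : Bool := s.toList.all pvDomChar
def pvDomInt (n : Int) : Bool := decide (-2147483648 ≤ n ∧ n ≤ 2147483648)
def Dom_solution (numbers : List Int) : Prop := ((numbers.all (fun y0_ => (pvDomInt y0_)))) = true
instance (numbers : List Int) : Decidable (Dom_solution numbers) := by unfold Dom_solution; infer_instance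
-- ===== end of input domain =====

-- B replaces A's recursive subtree-product check by a flat scan verifying, for each '1' bit,
-- that every ancestor on the root-to-node path is '1' (alternative algorithm, same cost).

-- ===== PORT A =====
-- bin(num)[2:], shared by both Pythons verbatim: for num ≥ 0 the binary digits of num
-- ('0' for 0); for num < 0, bin(num) = '-0b…', so [2:] is 'b' followed by the digits of -num.
def natBits (n : Nat) : List Char :=
  if n = 0 then [] else natBits (n / 2) ++ [if n % 2 = 1 then '1' else '0']

def binNat (n : Nat) : List Char := if n = 0 then ['0'] else natBits n

def pyBin2 (num : Int) : List Char :=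
  if num < 0 then 'b' :: binNat (-num).toNat else binNat num.toNat

def isFullBinaryTree (n : Nat) : Bool :=
  if n = 1 then true
  else if n % 2 = 0 then false
  else isFullBinaryTree (n / 2)
termination_by n
decreasing_by omega

-- the while-loop 'while not isFullBinaryTree(len(n)): n = '0' + n' with a fuel guard;
-- fuel s.length suffices (the next length of form 2^k-1 is at most 2·len-1, proved below)
def padGo : Nat → List Char → List Char
  | 0, s => s
  | f + 1, s => if isFullBinaryTree s.length then s else padGo f ('0' :: s)

def padA (s : List Char) : List Char := padGo s.length s

def isNotIncluedsOne (binary : List Char) : Int := if '1' ∈ binary then 0 else 1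

-- binary[len//2] is exact via getD: the index len/2 is in range whenever binary ≠ [],
-- and checkIsFullBinaryTree is only reached on padded (nonempty) strings.
def checkIsFullBinaryTree (s : List Char) : Int :=
  if s.length = 1 then 1
  else if h : s.getD (s.length / 2) ' ' = '1' then
    checkIsFullBinaryTree (s.take (s.length / 2)) *
      checkIsFullBinaryTree (s.drop (s.length / 2 + 1))
  else
    isNotIncluedsOne (s.take (s.length / 2)) * isNotIncluedsOne (s.drop (s.length / 2 + 1))
termination_by s.length
decreasing_by
  · have hne : s ≠ [] := by intro e; subst e; simp at h
    have : 0 < s.length := List.length_pos_iff.mpr hne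
    simp only [List.length_take]; omega
  · have hne : s ≠ [] := by intro e; subst e; simp at h
    have : 0 < s.length := List.length_pos_iff.mpr hne
    simp only [List.length_drop]; omega

def solution (numbers : List Int) : List Int :=
  numbers.foldl (fun answer num => answer ++ [checkIsFullBinaryTree (padA (pyBin2 num))]) []

-- ===== PORT B =====
-- closed-form padding: L := the first length of form 2^k-1 that is ≥ len(s)
def nextLen (acc l : Nat) : Nat :=
  if acc < l then nextLen (2 * acc + 1) l else acc
termination_by l - acc

def padB (s : List Char) : List Char :=
  List.replicate (nextLen 1 s.length - s.length) '0' ++ s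

-- the while-True descent of path_ok with a fuel guard (the interval shrinks each turn;
-- fuel len+1 suffices); s[mid] is exact via getD: mid stays in range at reachable calls
def pathGo (s : List Char) : Nat → Nat → Nat → Nat → Bool
  | 0, _, _, _ => true
  | f + 1, lo, hi, p =>
    let mid := (lo + hi) / 2
    if mid = p then true
    else if s.getD mid ' ' ≠ '1' then false
    else if p < mid then pathGo s f lo mid p
    else pathGo s f (mid + 1) hi p

def pathOk (s : List Char) (p : Nat) : Bool := pathGo s (s.length + 1) 0 s.length p

-- 'for p in range(L): if s[p]=='1' and not path_ok(s,p): return 0' then 'return 1'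
def scanGo (s : List Char) : Nat → Nat → Int
  | 0, _ => 1
  | f + 1, p => if s.getD p ' ' = '1' ∧ pathOk s p = false then 0 else scanGo s f (p + 1)

def check (num : Int) : Int :=
  let s := padB (pyBin2 num)
  scanGo s s.length 0

def solution_alt (numbers : List Int) : List Int := numbers.map check

-- ===== PRECONDITION & SPEC =====
def Spec_solution (numbers : List Int) (out : List Int) : Prop := out = solution_alt numbers
instance (numbers : List Int) (out : List Int) : Decidable (Spec_solution numbers out) := by unfold Spec_solution; infer_instance

-- ===== CLAIM (what is proved, stated in full; the proofs are below) =====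
def Claim_equal_solution : Prop := ∀ (numbers : List Int), Dom_solution numbers → Spec_solution numbers (solution numbers)

-- ===== LEMMAS AND PROOFS =====

theorem nextLen_not_lt (acc l : Nat) (h : ¬ acc < l) : nextLen acc l = acc := by
  unfold nextLen; rw [if_neg h]

theorem nextLen_lt (acc l : Nat) (h : acc < l) : nextLen acc l = nextLen (2 * acc + 1) l := by
  conv_lhs => unfold nextLen
  rw [if_pos h]

theorem isFull_iff (l : Nat) : isFullBinaryTree l = true ↔ ∃ k, l = 2 ^ (k + 1) - 1 := by
  induction l using Nat.strong_induction_on with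
  | _ l ih =>
    unfold isFullBinaryTree
    split_ifs with h1 h2
    · subst h1; simp only [true_iff]; exact ⟨0, rfl⟩
    · simp only [false_iff]
      rintro ⟨k, hk⟩
      have h3 : 2 ^ (k + 1) = 2 * 2 ^ k := by ring
      have h4 : 1 ≤ 2 ^ k := Nat.one_le_two_pow
      omega
    · rw [ih (l / 2) (by omega)]
      constructor
      · rintro ⟨k, hk⟩
        refine ⟨k + 1, ?_⟩
        have h3 : 2 ^ (k + 2) = 2 * 2 ^ (k + 1) := by ring
        have h4 : 1 ≤ 2 ^ (k + 1) := Nat.one_le_two_pow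
        omega
      · rintro ⟨k, hk⟩
        cases k with
        | zero => omega
        | succ k' =>
          refine ⟨k', ?_⟩
          have h3 : 2 ^ (k' + 2) = 2 * 2 ^ (k' + 1) := by ring
          have h4 : 1 ≤ 2 ^ (k' + 1) := Nat.one_le_two_pow
          omega

theorem nextLen_ge_aux (d : Nat) : ∀ acc l, l - acc ≤ d → l ≤ nextLen acc l := by
  induction d with
  | zero => intro acc l hd; rw [nextLen_not_lt acc l (by omega)]; omega
  | succ d ih =>
    intro acc l hd
    by_cases hlt : acc < l
    · rw [nextLen_lt acc l hlt]; exact ih _ _ (by omega)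
    · rw [nextLen_not_lt acc l hlt]; omega

theorem nextLen_ge (acc l : Nat) : l ≤ nextLen acc l := nextLen_ge_aux (l - acc) acc l le_rfl

theorem nextLen_full_aux (d : Nat) : ∀ acc l, l - acc ≤ d → (∃ k, acc = 2 ^ (k + 1) - 1) →
    ∃ k, nextLen acc l = 2 ^ (k + 1) - 1 := by
  induction d with
  | zero => intro acc l hd h; rwa [nextLen_not_lt acc l (by omega)]
  | succ d ih =>
    intro acc l hd h
    by_cases hlt : acc < l
    · rw [nextLen_lt acc l hlt]
      refine ih _ _ (by omega) ?_
      obtain ⟨k, hk⟩ := h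
      refine ⟨k + 1, ?_⟩
      have h3 : 2 ^ (k + 2) = 2 * 2 ^ (k + 1) := by ring
      have h4 : 1 ≤ 2 ^ (k + 1) := Nat.one_le_two_pow
      omega
    · rwa [nextLen_not_lt acc l hlt]

theorem nextLen_full (acc l : Nat) (h : ∃ k, acc = 2 ^ (k + 1) - 1) :
    ∃ k, nextLen acc l = 2 ^ (k + 1) - 1 := nextLen_full_aux (l - acc) acc l le_rfl h

theorem nextLen_self_aux (d : Nat) : ∀ acc l, l - acc ≤ d → (∃ j, acc = 2 ^ (j + 1) - 1) →
    (∃ k, l = 2 ^ (k + 1) - 1) → acc ≤ l → nextLen acc l = l := by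
  induction d with
  | zero => intro acc l hd _ _ hle; rw [nextLen_not_lt acc l (by omega)]; omega
  | succ d ih =>
    intro acc l hd ha hl hle
    by_cases hlt : acc < l
    · rw [nextLen_lt acc l hlt]
      obtain ⟨j, hj⟩ := ha
      obtain ⟨k, hk⟩ := hl
      have h4 : 1 ≤ 2 ^ (j + 1) := Nat.one_le_two_pow
      have h5 : 1 ≤ 2 ^ (k + 1) := Nat.one_le_two_pow
      have hjk : j + 1 < k + 1 := by
        have hplt : (2 : Nat) ^ (j + 1) < 2 ^ (k + 1) := by omega
        exact (Nat.pow_lt_pow_iff_right (by norm_num)).mp hplt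
      have hle2 : 2 ^ (j + 2) ≤ 2 ^ (k + 1) := Nat.pow_le_pow_right (by norm_num) (by omega)
      have h3 : 2 ^ (j + 2) = 2 * 2 ^ (j + 1) := by ring
      exact ih (2 * acc + 1) l (by omega) ⟨j + 1, by omega⟩ ⟨k, hk⟩ (by omega)
    · rw [nextLen_not_lt acc l hlt]; omega

theorem nextLen_self (acc l : Nat) (ha : ∃ j, acc = 2 ^ (j + 1) - 1)
    (hl : ∃ k, l = 2 ^ (k + 1) - 1) (hle : acc ≤ l) : nextLen acc l = l :=
  nextLen_self_aux (l - acc) acc l le_rfl ha hl hle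

theorem nextLen_stable_aux (d : Nat) : ∀ acc l, l - acc ≤ d → (∃ j, acc = 2 ^ (j + 1) - 1) →
    isFullBinaryTree l = false → nextLen acc (l + 1) = nextLen acc l := by
  induction d with
  | zero =>
    intro acc l hd ha hl
    have hne : acc ≠ l := by
      intro he; subst he
      rw [(isFull_iff acc).mpr ha] at hl; cases hl
    rw [nextLen_not_lt acc l (by omega), nextLen_not_lt acc (l + 1) (by omega)]
  | succ d ih =>
    intro acc l hd ha hl
    by_cases hlt : acc < l
    · rw [nextLen_lt acc l hlt, nextLen_lt acc (l + 1) (by omega)]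
      obtain ⟨j, hj⟩ := ha
      have h3 : 2 ^ (j + 2) = 2 * 2 ^ (j + 1) := by ring
      have h4 : 1 ≤ 2 ^ (j + 1) := Nat.one_le_two_pow
      exact ih (2 * acc + 1) l (by omega) ⟨j + 1, by omega⟩ hl
    · have hne : acc ≠ l := by
        intro he; subst he
        rw [(isFull_iff acc).mpr ha] at hl; cases hl
      rw [nextLen_not_lt acc l hlt, nextLen_not_lt acc (l + 1) (by omega)]

theorem nextLen_stable (acc l : Nat) (ha : ∃ j, acc = 2 ^ (j + 1) - 1)
    (hl : isFullBinaryTree l = false) : nextLen acc (l + 1) = nextLen acc l :=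
  nextLen_stable_aux (l - acc) acc l le_rfl ha hl

theorem nextLen_le_aux (d : Nat) : ∀ acc l, l - acc ≤ d → acc ≤ 2 * l - 1 →
    nextLen acc l ≤ 2 * l - 1 := by
  induction d with
  | zero => intro acc l hd h; rwa [nextLen_not_lt acc l (by omega)]
  | succ d ih =>
    intro acc l hd h
    by_cases hlt : acc < l
    · rw [nextLen_lt acc l hlt]; exact ih _ _ (by omega) (by omega)
    · rwa [nextLen_not_lt acc l hlt]

theorem nextLen_le (acc l : Nat) (h : acc ≤ 2 * l - 1) : nextLen acc l ≤ 2 * l - 1 :=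
  nextLen_le_aux (l - acc) acc l le_rfl h

theorem one_full : ∃ k, (1 : Nat) = 2 ^ (k + 1) - 1 := ⟨0, rfl⟩

theorem pad_eq (g : Nat) : ∀ (s : List Char), 1 ≤ s.length →
    g = nextLen 1 s.length - s.length → ∀ fuel, g ≤ fuel →
    padGo fuel s = List.replicate g '0' ++ s := by
  induction g with
  | zero =>
    intro s hs hg fuel _
    simp only [List.replicate_zero, List.nil_append]
    cases fuel with
    | zero => rfl
    | succ f =>
      unfold padGo
      split_ifs with hfull
      · rfl
      · exfalso
        have hge := nextLen_ge 1 s.length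
        have hN := nextLen_full 1 s.length one_full
        have heq : nextLen 1 s.length = s.length := by omega
        rw [heq] at hN
        exact hfull ((isFull_iff s.length).mpr hN)
  | succ g ih =>
    intro s hs hg fuel hfuel
    have hnotfull : isFullBinaryTree s.length = false := by
      by_contra hc
      have hfull := (isFull_iff s.length).mp (by revert hc; cases isFullBinaryTree s.length <;> simp)
      have := nextLen_self 1 s.length one_full hfull hs
      omega
    cases fuel with
    | zero => omega
    | succ f =>
      unfold padGo
      rw [if_neg (by rw [hnotfull]; exact Bool.false_ne_true)]
      have hstable := nextLen_stable 1 s.length one_full hnotfull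
      have hge := nextLen_ge 1 s.length
      have hN := nextLen_full 1 s.length one_full
      have hNne : nextLen 1 s.length ≠ s.length := by
        intro he
        rw [he] at hN
        rw [(isFull_iff s.length).mpr hN] at hnotfull; cases hnotfull
      have hrec := ih ('0' :: s) (by simp) (by simp only [List.length_cons, hstable]; omega)
        f (by omega)
      rw [hrec]
      rw [List.replicate_succ']
      simp

theorem padA_eq_padB (s : List Char) (h : 1 ≤ s.length) : padA s = padB s := by
  unfold padA padB
  exact pad_eq (nextLen 1 s.length - s.length) s h rfl s.length
    (by have := nextLen_le 1 s.length (by omega); omega)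

theorem binNat_ne_nil (n : Nat) : binNat n ≠ [] := by
  unfold binNat
  split_ifs with h
  · simp
  · unfold natBits
    rw [if_neg h]
    simp

theorem pyBin2_ne_nil (num : Int) : pyBin2 num ≠ [] := by
  unfold pyBin2
  split_ifs with h
  · simp
  · exact binNat_ne_nil _

theorem pathGo_fuel (s : List Char) :
    ∀ f1 f2 lo hi p, lo ≤ p → p < hi → hi - lo ≤ f1 → hi - lo ≤ f2 →
    pathGo s f1 lo hi p = pathGo s f2 lo hi p := by
  intro f1
  induction f1 with
  | zero => intro f2 lo hi p h1 h2 h3 h4; omega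
  | succ f ih =>
    intro f2 lo hi p h1 h2 h3 h4
    cases f2 with
    | zero => omega
    | succ f2 =>
      simp only [pathGo]
      split_ifs with hmid hchar hlt
      · rfl
      · rfl
      · exact ih f2 lo ((lo + hi) / 2) p h1 hlt (by omega) (by omega)
      · exact ih f2 ((lo + hi) / 2 + 1) hi p (by omega) h2 (by omega) (by omega)

theorem pathGo_take (s : List Char) (n : Nat) :
    ∀ f lo hi p, lo ≤ p → p < hi → hi ≤ n →
    pathGo (s.take n) f lo hi p = pathGo s f lo hi p := by
  intro f
  induction f with
  | zero => intro lo hi p _ _ _; rfl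
  | succ f ih =>
    intro lo hi p h1 h2 h3
    have hmidlt : (lo + hi) / 2 < n := by omega
    have hgd : (s.take n).getD ((lo + hi) / 2) ' ' = s.getD ((lo + hi) / 2) ' ' := by
      simp [List.getD_eq_getElem?_getD, List.getElem?_take, hmidlt]
    simp only [pathGo, hgd]
    split_ifs with hmid hchar hlt
    · rfl
    · rfl
    · exact ih lo ((lo + hi) / 2) p h1 hlt (by omega)
    · exact ih ((lo + hi) / 2 + 1) hi p (by omega) h2 h3

theorem pathGo_drop (s : List Char) (o : Nat) :
    ∀ f lo hi p,
    pathGo (s.drop o) f lo hi p = pathGo s f (lo + o) (hi + o) (p + o) := by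
  intro f
  induction f with
  | zero => intro lo hi p; rfl
  | succ f ih =>
    intro lo hi p
    have hmid : (lo + o + (hi + o)) / 2 = (lo + hi) / 2 + o := by omega
    have hgd : (s.drop o).getD ((lo + hi) / 2) ' ' = s.getD ((lo + hi) / 2 + o) ' ' := by
      simp [List.getD_eq_getElem?_getD, List.getElem?_drop, Nat.add_comm]
    simp only [pathGo, hmid, hgd, Nat.add_left_inj, Nat.add_lt_add_iff_right]
    split_ifs with hmid2 hchar hlt
    · rfl
    · rfl
    · exact ih lo ((lo + hi) / 2) p
    · have ha : (lo + hi) / 2 + o + 1 = (lo + hi) / 2 + 1 + o := by omega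
      rw [ha]
      exact ih ((lo + hi) / 2 + 1) hi p

-- result = 1 iff every '1' position has an all-'1' root-to-node path
def good (s : List Char) : Prop :=
  ∀ p, p < s.length → s.getD p ' ' = '1' → pathOk s p = true

theorem scanGo_eq (s : List Char) :
    ∀ f p, (scanGo s f p = 1 ↔ ∀ q, p ≤ q → q < p + f → s.getD q ' ' = '1' → pathOk s q = true) ∧
      (scanGo s f p = 0 ∨ scanGo s f p = 1) := by
  intro f
  induction f with
  | zero =>
    intro p
    refine ⟨?_, Or.inr rfl⟩
    simp only [scanGo]
    constructor
    · intro _ q h1 h2; omega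
    · intro _; trivial
  | succ f ih =>
    intro p
    simp only [scanGo]
    split_ifs with hc
    · constructor
      · constructor
        · intro h0; cases h0
        · intro hall
          exfalso
          have := hall p le_rfl (by omega) hc.1
          rw [hc.2] at this; cases this
      · exact Or.inl rfl
    · obtain ⟨hiff, hval⟩ := ih (p + 1)
      refine ⟨?_, hval⟩
      rw [hiff]
      constructor
      · intro hall q h1 h2 h3
        rcases Nat.eq_or_lt_of_le h1 with he | hlt
        · subst he
          cases hpo : pathOk s p with
          | true => rfl
          | false => exact absurd ⟨h3, hpo⟩ hc
        · exact hall q hlt (by omega) h3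
      · intro hall q h1 h2 h3
        exact hall q (by omega) (by omega) h3

theorem mem_one_iff (t : List Char) : '1' ∈ t ↔ ∃ i, i < t.length ∧ t.getD i ' ' = '1' := by
  rw [List.mem_iff_getElem]
  constructor
  · rintro ⟨i, hi, he⟩
    exact ⟨i, hi, by rw [List.getD_eq_getElem t ' ' hi, he]⟩
  · rintro ⟨i, hi, he⟩
    exact ⟨i, hi, by rw [List.getD_eq_getElem t ' ' hi] at he; exact he⟩

-- one unfolding step of pathOk at the root of a full tree of size 2*m+1
theorem pathOk_root (s : List Char) (m p : Nat) (hm : s.length = 2 * m + 1) (hp : p < s.length) :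
    pathOk s p = (if m = p then true
      else if s.getD m ' ' ≠ '1' then false
      else if p < m then pathGo s s.length 0 m p
      else pathGo s s.length (m + 1) s.length p) := by
  unfold pathOk
  conv_lhs => rw [show s.length + 1 = s.length + 1 from rfl]
  simp only [pathGo]
  have h2 : (0 + s.length) / 2 = m := by omega
  rw [h2]

theorem pathOk_left (s : List Char) (m p : Nat) (hm : s.length = 2 * m + 1) (hp : p < m)
    (hmid : s.getD m ' ' = '1') : pathOk s p = pathOk (s.take m) p := by
  rw [pathOk_root s m p hm (by omega)]
  rw [if_neg (by omega), if_neg (not_not.mpr hmid), if_pos hp]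
  have hlen : (s.take m).length = m := by simp [List.length_take]; omega
  unfold pathOk
  rw [hlen, pathGo_take s m (m + 1) 0 m p (by omega) hp le_rfl]
  exact pathGo_fuel s s.length (m + 1) 0 m p (by omega) hp (by omega) (by omega)

theorem pathOk_right (s : List Char) (m p : Nat) (hm : s.length = 2 * m + 1) (hp : p < m)
    (hmid : s.getD m ' ' = '1') : pathOk s (m + 1 + p) = pathOk (s.drop (m + 1)) p := by
  rw [pathOk_root s m (m + 1 + p) hm (by omega)]
  rw [if_neg (by omega), if_neg (not_not.mpr hmid), if_neg (by omega)]
  have hlen : (s.drop (m + 1)).length = m := by simp [List.length_drop]; omega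
  unfold pathOk
  rw [hlen, pathGo_drop s (m + 1) (m + 1) 0 m p]
  have h1 : (0 : Nat) + (m + 1) = m + 1 := by omega
  have h2 : m + (m + 1) = s.length := by omega
  have h3 : p + (m + 1) = m + 1 + p := by omega
  rw [h1, h2, h3]
  exact (pathGo_fuel s (m + 1) s.length (m + 1) s.length (m + 1 + p) (by omega) (by omega)
    (by omega) (by omega)).symm

theorem getD_take_eq (s : List Char) (m p : Nat) (hp : p < m) :
    (s.take m).getD p ' ' = s.getD p ' ' := by
  simp [List.getD_eq_getElem?_getD, List.getElem?_take, hp]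

theorem getD_drop_eq (s : List Char) (m p : Nat) :
    (s.drop (m + 1)).getD p ' ' = s.getD (m + 1 + p) ' ' := by
  simp [List.getD_eq_getElem?_getD, List.getElem?_drop]

theorem checkA_eq (h : Nat) : ∀ (s : List Char), s.length = 2 ^ (h + 1) - 1 →
    (checkIsFullBinaryTree s = 1 ↔ good s) ∧
      (checkIsFullBinaryTree s = 0 ∨ checkIsFullBinaryTree s = 1) := by
  induction h with
  | zero =>
    intro s hs
    have hs1 : s.length = 1 := by norm_num at hs; omega
    clear hs
    have hone : checkIsFullBinaryTree s = 1 := by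
      unfold checkIsFullBinaryTree
      rw [if_pos hs1]
    refine ⟨⟨fun _ => ?_, fun _ => hone⟩, Or.inr hone⟩
    intro p hp hc
    rw [hs1] at hp
    have hp0 : p = 0 := by omega
    subst hp0
    unfold pathOk
    rw [hs1]
    norm_num [pathGo]
  | succ h ih =>
    intro s hs
    have hpow : 2 ^ (h + 2) = 2 * 2 ^ (h + 1) := by ring
    have hpos : 1 ≤ 2 ^ (h + 1) := Nat.one_le_two_pow
    set m := 2 ^ (h + 1) - 1 with hm
    have hlen : s.length = 2 * m + 1 := by omega
    have hne1 : s.length ≠ 1 := by omega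
    have hdiv : s.length / 2 = m := by omega
    have hltake : (s.take m).length = 2 ^ (h + 1) - 1 := by
      simp [List.length_take]; omega
    have hldrop : (s.drop (m + 1)).length = 2 ^ (h + 1) - 1 := by
      simp [List.length_drop]; omega
    obtain ⟨ihl_iff, ihl_val⟩ := ih (s.take m) hltake
    obtain ⟨ihr_iff, ihr_val⟩ := ih (s.drop (m + 1)) hldrop
    unfold checkIsFullBinaryTree
    rw [if_neg hne1, hdiv]
    split_ifs with hmid
    · -- mid = '1' : recursive branch
      constructor
      · constructor
        · intro hprod
          have hboth : checkIsFullBinaryTree (s.take m) = 1 ∧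
              checkIsFullBinaryTree (s.drop (m + 1)) = 1 := by
            rcases ihl_val with hv | hv <;> rcases ihr_val with hv' | hv' <;>
              rw [hv, hv'] at hprod <;> norm_num at hprod <;> exact ⟨hv, hv'⟩
          have hgl := ihl_iff.mp hboth.1
          have hgr := ihr_iff.mp hboth.2
          intro p hp hc
          rcases Nat.lt_trichotomy p m with hlt | heq | hgt
          · rw [pathOk_left s m p hlen hlt hmid]
            exact hgl p (by omega) (by rw [getD_take_eq s m p hlt]; exact hc)
          · rw [heq, pathOk_root s m m hlen (by omega), if_pos rfl]
          · have hq : p = m + 1 + (p - m - 1) := by omega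
            rw [hq, pathOk_right s m (p - m - 1) hlen (by omega) hmid]
            refine hgr (p - m - 1) (by omega) ?_
            rw [getD_drop_eq s m (p - m - 1), ← hq]
            exact hc
        · intro hg
          have hl1 : checkIsFullBinaryTree (s.take m) = 1 := by
            rw [ihl_iff]
            intro p hp hc
            rw [← pathOk_left s m p hlen (by omega) hmid]
            exact hg p (by omega) (by rw [← getD_take_eq s m p (by omega)]; exact hc)
          have hr1 : checkIsFullBinaryTree (s.drop (m + 1)) = 1 := by
            rw [ihr_iff]
            intro p hp hc
            rw [← pathOk_right s m p hlen (by omega) hmid]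
            exact hg (m + 1 + p) (by omega) (by rw [← getD_drop_eq s m p]; exact hc)
          rw [hl1, hr1]; norm_num
      · rcases ihl_val with hv | hv <;> rcases ihr_val with hv' | hv' <;>
          rw [hv, hv'] <;> norm_num
    · -- mid ≠ '1' : no '1' may appear anywhere
      unfold isNotIncluedsOne
      constructor
      · constructor
        · intro hprod
          by_cases hml : '1' ∈ s.take m
          · rw [if_pos hml] at hprod; norm_num at hprod
          by_cases hmr : '1' ∈ s.drop (m + 1)
          · rw [if_neg hml, if_pos hmr] at hprod; norm_num at hprod
          · intro p hp hc
            exfalso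
            rcases Nat.lt_trichotomy p m with hlt | heq | hgt
            · exact hml ((mem_one_iff _).mpr ⟨p, by rw [hltake]; omega,
                by rw [getD_take_eq s m p hlt]; exact hc⟩)
            · exact hmid (heq ▸ hc)
            · refine hmr ((mem_one_iff _).mpr ⟨p - m - 1, by rw [hldrop]; omega, ?_⟩)
              rw [getD_drop_eq s m (p - m - 1)]
              have hq : m + 1 + (p - m - 1) = p := by omega
              rw [hq]; exact hc
        · intro hg
          have hml : ¬ '1' ∈ s.take m := by
            rw [mem_one_iff]
            rintro ⟨i, hi, he⟩
            rw [hltake] at hi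
            rw [getD_take_eq s m i (by omega)] at he
            have := hg i (by omega) he
            rw [pathOk_root s m i hlen (by omega), if_neg (by omega),
              if_pos hmid] at this
            cases this
          have hmr : ¬ '1' ∈ s.drop (m + 1) := by
            rw [mem_one_iff]
            rintro ⟨i, hi, he⟩
            rw [hldrop] at hi
            rw [getD_drop_eq s m i] at he
            have := hg (m + 1 + i) (by omega) he
            rw [pathOk_root s m (m + 1 + i) hlen (by omega), if_neg (by omega),
              if_pos hmid] at this
            cases this
          rw [if_neg hml, if_neg hmr]; norm_num
      · split_ifs <;> norm_num

theorem check_eq (num : Int) :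
    checkIsFullBinaryTree (padA (pyBin2 num)) = check num := by
  have hne := pyBin2_ne_nil num
  have hlen : 1 ≤ (pyBin2 num).length := by
    cases hb : pyBin2 num with
    | nil => exact absurd hb hne
    | cons a t => simp
  rw [padA_eq_padB (pyBin2 num) hlen]
  unfold check
  set s := padB (pyBin2 num) with hsdef
  have hslen : s.length = nextLen 1 (pyBin2 num).length := by
    have hge := nextLen_ge 1 (pyBin2 num).length
    simp [hsdef, padB, List.length_append, List.length_replicate]
    omega
  obtain ⟨k, hk⟩ := nextLen_full 1 (pyBin2 num).length one_full
  have hsfull : s.length = 2 ^ (k + 1) - 1 := by rw [hslen, hk]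
  obtain ⟨ha_iff, ha_val⟩ := checkA_eq k s hsfull
  obtain ⟨hb_iff, hb_val⟩ := scanGo_eq s s.length 0
  by_cases hg : good s
  · rw [ha_iff.mpr hg, hb_iff.mpr (by intro q h1 h2 h3; exact hg q (by omega) h3)]
  · have ha0 : checkIsFullBinaryTree s = 0 := by
      rcases ha_val with h0 | h1
      · exact h0
      · exact absurd (ha_iff.mp h1) hg
    have hb0 : scanGo s s.length 0 = 0 := by
      rcases hb_val with h0 | h1
      · exact h0
      · exact absurd (by intro q hq h3; exact hb_iff.mp h1 q (by omega) (by omega) h3) hg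
    rw [ha0, hb0]

-- ===== VERDICT (by name: the statement is the Claim_ definition above) =====
theorem solution_spec : Claim_equal_solution := by
  intro numbers _
  unfold Spec_solution solution solution_alt
  rw [PySem.List.foldl_append_singleton_eq_map]
  simp only [List.nil_append]
  exact List.map_congr_left (fun num _ => check_eq num)
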